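-- pv_equiv track=rewrite | github.com/bmad-sim/bmad-ecosystem | util_programs/sad_to_bmad/sad_to_bmad.py | add_parens
-- ===== SOURCE A (Python) =====
-- def add_parens (str, operand):
--
--   if operand == '-':
--     if str.lstrip()[0] == '-':
--       return '(' + str + ')'
--     else:
--       return str
--
--   #
--   slash_here = (operand == '/')
--
--   for ix in range(1, len(str)):
--     if slash_here and (str[ix] == '*' or str[ix] == '/'): return '(' + str + ')'
--     if str[ix] != '+' and str[ix] != '-': continue
--     if str[ix-1] == 'e' or str[ix-1] == 'E': continue  # '+' in '3.0e+7' is not an operator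
--     return '(' + str + ')'
--
--   # No +/- op found so just return the expression.
--   return str
-- ===== SOURCE B (Python) =====
-- def add_parens(str, operand):
--
--   if operand == '-':
--     if str.lstrip()[0] == '-':
--       return '(' + str + ')'
--     else:
--       return str
--
--   # Stage 1: blank out exponent signs ('e+' in '3.0e+7' etc.) so they cannot
--   # be mistaken for operators.  Stage 2: plain substring membership tests on
--   # the masked text past position 0 (an operator at position 0 never counts).
--   masked = str.replace('e+', '  ').replace('e-', '  ').replace('E+', '  ').replace('E-', '  ')
--   tail = masked[1:]
--   ops = '+-*/' if operand == '/' else '+-'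
--   for op in ops:
--     if op in tail:
--       return '(' + str + ')'
--   return str
-- ===== Notes on version B (the rewrite author's own statement) =====
-- stated objective: faster
-- what changed: A's single indexed Python scan with per-position operator/exponent conditions is replaced by two staged passes: first the exponent signs (e+/e-/E+/E-) are blanked out with chained str.replace calls, then the decision is plain substring membership tests of the operator characters in the masked text past position 0; the '-' branch is unchanged.
import Mathlib
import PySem

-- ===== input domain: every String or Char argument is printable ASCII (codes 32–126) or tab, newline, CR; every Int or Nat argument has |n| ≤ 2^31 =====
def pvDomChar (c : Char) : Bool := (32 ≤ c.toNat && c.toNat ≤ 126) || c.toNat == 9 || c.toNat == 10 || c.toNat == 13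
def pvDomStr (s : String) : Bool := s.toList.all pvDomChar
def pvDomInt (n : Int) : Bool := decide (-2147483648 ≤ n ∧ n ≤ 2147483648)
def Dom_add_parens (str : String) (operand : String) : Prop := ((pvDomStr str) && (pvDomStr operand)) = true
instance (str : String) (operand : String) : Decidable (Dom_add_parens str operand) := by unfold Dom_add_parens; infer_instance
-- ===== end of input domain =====

-- B replaces A's single indexed scan (per-position operator/exponent tests with early
-- returns) by two staged passes: blank out the exponent signs e+/e-/E+/E- with chained
-- str.replace calls, then decide by plain substring membership of the operator
-- characters in the masked text past position 0; the '-' branch is kept as in A.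

-- ===== PORT A =====
-- the 'for ix in range(1, len(str))' loop with its early returns, as index recursion;
-- str[ix-1] is always in range when reached (ix ≥ 1), ported as getD with a dummy default
def addParensLoopA (s : List Char) (slash : Bool) (ix : Nat) : Bool :=
  if h : ix < s.length then
    if slash && (s[ix] == '*' || s[ix] == '/') then true
    else if s[ix] != '+' && s[ix] != '-' then addParensLoopA s slash (ix + 1)
    else if s.getD (ix - 1) ' ' == 'e' || s.getD (ix - 1) ' ' == 'E' then addParensLoopA s slash (ix + 1)
    else true
  else false
termination_by s.length - ix

def add_parens (str : String) (operand : String) : String :=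
  if operand == "-" then
    -- str.lstrip()[0]: none = IndexError, excluded by Pre_
    match PySem.Str.pyGet? (PySem.Str.lstrip str) 0 with
    | some c => if c == '-' then "(" ++ str ++ ")" else str
    | none => str
  else
    let slash_here := operand == "/"
    if addParensLoopA str.toList slash_here 1 then "(" ++ str ++ ")" else str

-- ===== PORT B =====
def add_parens_alt (str : String) (operand : String) : String :=
  if operand == "-" then
    match PySem.Str.pyGet? (PySem.Str.lstrip str) 0 with
    | some c => if c == '-' then "(" ++ str ++ ")" else str
    | none => str
  else
    -- Stage 1: blank out exponent signs; Stage 2: membership tests past position 0.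
    let masked := PySem.Str.replace (PySem.Str.replace (PySem.Str.replace
                    (PySem.Str.replace str "e+" "  ") "e-" "  ") "E+" "  ") "E-" "  "
    let tail := PySem.Str.slice masked (some 1) none
    let ops := if operand == "/" then "+-*/" else "+-"
    -- 'for op in ops: if op in tail: return …' as an any over the characters of ops
    if ops.toList.any (fun op => PySem.Str.isIn (String.ofList [op]) tail) then
      "(" ++ str ++ ")"
    else str

-- ===== PRECONDITION & SPEC =====
-- Pre_ excludes operand '-' with an all-whitespace str, where A (and B) raise IndexError on str.lstrip()[0].
def Pre_add_parens (str : String) (operand : String) : Prop :=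
  operand = "-" → PySem.Str.lstrip str ≠ ""
instance (str : String) (operand : String) : Decidable (Pre_add_parens str operand) := by
  unfold Pre_add_parens; infer_instance

def pvWitness_add_parens : String × String := ("3.0e+7", "/")

def Spec_add_parens (str : String) (operand : String) (out : String) : Prop := out = add_parens_alt str operand
instance (str : String) (operand : String) (out : String) : Decidable (Spec_add_parens str operand out) := by unfold Spec_add_parens; infer_instance

-- ===== CLAIM (what is proved, stated in full; the proofs are below) =====
def Claim_equal_add_parens : Prop := ∀ (str : String) (operand : String), Dom_add_parens str operand → Pre_add_parens str operand → Spec_add_parens str operand (add_parens str operand)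

-- ===== LEMMAS AND PROOFS =====

-- the condition A's loop tests for the adjacent pair (previous char, current char)
def pairPred (slash : Bool) (pc : Char × Char) : Bool :=
  (slash && (pc.2 == '*' || pc.2 == '/')) ||
  ((pc.2 == '+' || pc.2 == '-') && !(pc.1 == 'e' || pc.1 == 'E'))

-- greedy one-pattern two-char replace (what str.replace('xy', '  ') computes)
def mask1 (x y : Char) : List Char → List Char
  | [] => []
  | [a] => [a]
  | a :: b :: t => if a = x ∧ b = y then ' ' :: ' ' :: mask1 x y t else a :: mask1 x y (b :: t)

-- simultaneous masking of all four exponent-sign patterns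
def maskF : List Char → List Char
  | [] => []
  | [a] => [a]
  | a :: b :: t =>
      if (a = 'e' ∨ a = 'E') ∧ (b = '+' ∨ b = '-') then ' ' :: ' ' :: maskF t
      else a :: maskF (b :: t)

def headPM : List Char → Bool
  | [] => false
  | a :: _ => a == '+' || a == '-'

-- which relevant operator characters occur in the (masked) text
def OpsMemP (slash : Bool) (m : List Char) : Prop :=
  (slash = true ∧ ('*' ∈ m ∨ '/' ∈ m)) ∨ '+' ∈ m ∨ '-' ∈ m

-- A's loop from index ix (ix ≥ 1) is the any of pairPred over adjacent pairs from ix-1 on.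
theorem addParensLoopA_eq_any (s : List Char) (slash : Bool) :
    ∀ fuel ix, s.length - ix ≤ fuel → 1 ≤ ix →
      addParensLoopA s slash ix = ((s.zip s.tail).drop (ix - 1)).any (pairPred slash) := by
  intro fuel
  induction fuel with
  | zero =>
    intro ix hle h1
    rw [addParensLoopA]
    rw [dif_neg (by omega)]
    have : (s.zip s.tail).length ≤ ix - 1 := by
      simp [List.length_zip, List.length_tail]; omega
    rw [List.drop_eq_nil_of_le this]
    simp
  | succ n ih =>
    intro ix hle h1
    by_cases h : ix < s.length
    · have hz : ix - 1 < (s.zip s.tail).length := by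
        simp [List.length_zip, List.length_tail]; omega
      have hdrop : (s.zip s.tail).drop (ix - 1)
          = (s.zip s.tail)[ix - 1] :: (s.zip s.tail).drop ix := by
        have := List.drop_eq_getElem_cons hz
        simpa [show ix - 1 + 1 = ix by omega] using this
      have hpair : (s.zip s.tail)[ix - 1]
          = (s[ix - 1]'(by omega), s[ix]'h) := by
        have ht : ix - 1 < s.tail.length := by simp [List.length_tail]; omega
        rw [List.getElem_zip]
        congr 1
        rw [List.getElem_tail]
        congr 1
        omega
      have hrec : addParensLoopA s slash (ix + 1)
          = ((s.zip s.tail).drop ix).any (pairPred slash) := by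
        have := ih (ix + 1) (by omega) (by omega)
        simpa [show ix + 1 - 1 = ix by omega] using this
      have hgd : s.getD (ix - 1) ' ' = s[ix - 1]'(by omega) :=
        List.getD_eq_getElem s ' ' (by omega)
      rw [addParensLoopA, dif_pos h, hdrop, hpair, List.any_cons, hrec, hgd]
      set c := s[ix]'h with hc
      set p := s[ix - 1]'(by omega) with hp
      set r := ((s.zip s.tail).drop ix).any (pairPred slash) with hr
      simp only [pairPred]
      have hbn : (c != '+' && c != '-') = !(c == '+' || c == '-') := by
        simp [bne, Bool.not_or]
      rw [hbn]
      by_cases hA : (slash && (c == '*' || c == '/')) = true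
      · simp [hA]
      · by_cases hB : (c == '+' || c == '-') = true
        · by_cases hC : (p == 'e' || p == 'E') = true
          · simp [hA, hB, hC]
          · simp [hA, hB, hC]
        · simp [hA, Bool.eq_false_iff.mpr hB]
    · have : (s.zip s.tail).length ≤ ix - 1 := by
        simp [List.length_zip, List.length_tail]; omega
      rw [addParensLoopA, dif_neg h, List.drop_eq_nil_of_le this]
      simp

-- str.replace with a two-character pattern is the greedy mask1
theorem replace_go_eq_mask1 (x y : Char) :
    ∀ (fuel : Nat) (l acc : List Char), l.length ≤ fuel →
      PySem.Chars.replace.go [x, y] [' ', ' '] fuel l acc = acc.reverse ++ mask1 x y l := by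
  intro fuel
  induction fuel with
  | zero =>
    intro l acc h
    have hl : l = [] := by cases l with | nil => rfl | cons a t => simp at h
    subst hl
    rw [PySem.Chars.replace.go.eq_def]
    simp [mask1]
  | succ n ih =>
    intro l acc h
    rw [PySem.Chars.replace.go.eq_def]
    match l, h with
    | [], h => simp [mask1]
    | c :: t, h =>
      show (if ([x, y]).isPrefixOf (c :: t) = true then
              PySem.Chars.replace.go [x, y] [' ', ' '] n (List.drop ([x,y]).length (c :: t)) ([' ',' '].reverse ++ acc)
            else PySem.Chars.replace.go [x, y] [' ', ' '] n t (c :: acc)) = acc.reverse ++ mask1 x y (c :: t)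
      match t with
      | [] =>
        have hpre : ([x, y]).isPrefixOf [c] = false := by
          simp [List.isPrefixOf]
        rw [hpre]
        simp only [Bool.false_eq_true, if_false]
        rw [ih [] (c :: acc) (by simp)]
        simp [mask1]
      | b :: t' =>
        by_cases hm : c = x ∧ b = y
        · have hpre : ([x, y]).isPrefixOf (c :: b :: t') = true := by
            simp [List.isPrefixOf, hm.1, hm.2]
          rw [hpre, if_pos rfl]
          have hlen : t'.length ≤ n := by simp at h; omega
          show PySem.Chars.replace.go [x, y] [' ', ' '] n t' (' ' :: ' ' :: acc) = _
          rw [ih t' (' ' :: ' ' :: acc) hlen]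
          rw [mask1, if_pos hm]
          simp
        · have hpre : ([x, y]).isPrefixOf (c :: b :: t') = false := by
            simp [List.isPrefixOf]
            intro h1 h2
            exact absurd ⟨h1.symm, h2.symm⟩ hm
          rw [hpre]
          simp only [Bool.false_eq_true, if_false]
          rw [ih (b :: t') (c :: acc) (by simp at h ⊢; omega)]
          rw [mask1, if_neg hm]
          simp

theorem replace_eq_mask1 (x y : Char) (l : List Char) :
    PySem.Chars.replace l [x, y] [' ', ' '] = mask1 x y l := by
  rw [PySem.Chars.replace]
  simp only [List.isEmpty_cons, Bool.false_eq_true, if_false]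
  rw [replace_go_eq_mask1 x y l.length l [] le_rfl]
  simp

theorem mask1_cons_nomatch (x y a : Char) (l : List Char)
    (h : ¬(a = x ∧ l.head? = some y)) : mask1 x y (a :: l) = a :: mask1 x y l := by
  cases l with
  | nil => rfl
  | cons b t =>
    rw [mask1, if_neg]
    rintro ⟨h1, h2⟩
    exact h ⟨h1, by simp [h2]⟩

-- the head of mask1's output is the input's head or a space
theorem mask1_headOk (x y b : Char) (l : List Char)
    (h : l.head? = some b ∨ l.head? = some ' ') :
    (mask1 x y l).head? = some b ∨ (mask1 x y l).head? = some ' ' := by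
  cases l with
  | nil => simpa [mask1] using h
  | cons a t =>
    cases t with
    | nil => simpa [mask1] using h
    | cons c t' =>
      rw [mask1]
      split_ifs with hm
      · right; rfl
      · simpa using h

theorem mask1_space2 (x y : Char) (hx : x ≠ ' ') (l : List Char) :
    mask1 x y (' ' :: ' ' :: l) = ' ' :: ' ' :: mask1 x y l := by
  rw [mask1_cons_nomatch x y ' ' _ (by rintro ⟨h, -⟩; exact hx h.symm),
      mask1_cons_nomatch x y ' ' _ (by rintro ⟨h, -⟩; exact hx h.symm)]

-- the four sequential one-pattern masks equal the simultaneous mask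
theorem chain_eq_maskF :
    ∀ (n : Nat) (l : List Char), l.length ≤ n →
      mask1 'E' '-' (mask1 'E' '+' (mask1 'e' '-' (mask1 'e' '+' l))) = maskF l := by
  intro n
  induction n with
  | zero =>
    intro l h
    have hl : l = [] := by cases l with | nil => rfl | cons a t => simp at h
    subst hl; rfl
  | succ n ih =>
    intro l h
    match l with
    | [] => rfl
    | [a] => simp [mask1, maskF]
    | a :: b :: t =>
      have hlt : t.length ≤ n := by simp at h; omega
      have hlbt : (b :: t).length ≤ n := by simp at h ⊢; omega
      by_cases hm : (a = 'e' ∨ a = 'E') ∧ (b = '+' ∨ b = '-')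
      · rw [maskF, if_pos hm]
        obtain ⟨ha, hb⟩ := hm
        rcases ha with rfl | rfl <;> rcases hb with rfl | rfl
        · -- e +
          rw [show mask1 'e' '+' ('e' :: '+' :: t) = ' ' :: ' ' :: mask1 'e' '+' t from by
                rw [mask1, if_pos ⟨rfl, rfl⟩]]
          rw [mask1_space2 'e' '-' (by decide), mask1_space2 'E' '+' (by decide),
              mask1_space2 'E' '-' (by decide), ih t hlt]
        · -- e -
          rw [show mask1 'e' '+' ('e' :: '-' :: t) = 'e' :: '-' :: mask1 'e' '+' t from by
                rw [mask1, if_neg (by rintro ⟨-, h2⟩; exact absurd h2 (by decide)),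
                    mask1_cons_nomatch 'e' '+' '-' t (by rintro ⟨h1, -⟩; exact absurd h1 (by decide))]]
          rw [show mask1 'e' '-' ('e' :: '-' :: mask1 'e' '+' t)
                = ' ' :: ' ' :: mask1 'e' '-' (mask1 'e' '+' t) from by
                rw [mask1, if_pos ⟨rfl, rfl⟩]]
          rw [mask1_space2 'E' '+' (by decide), mask1_space2 'E' '-' (by decide), ih t hlt]
        · -- E +
          rw [show mask1 'e' '+' ('E' :: '+' :: t) = 'E' :: '+' :: mask1 'e' '+' t from by
                rw [mask1, if_neg (by rintro ⟨h1, -⟩; exact absurd h1 (by decide)),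
                    mask1_cons_nomatch 'e' '+' '+' t (by rintro ⟨h1, -⟩; exact absurd h1 (by decide))]]
          rw [show mask1 'e' '-' ('E' :: '+' :: mask1 'e' '+' t)
                = 'E' :: '+' :: mask1 'e' '-' (mask1 'e' '+' t) from by
                rw [mask1, if_neg (by rintro ⟨h1, -⟩; exact absurd h1 (by decide)),
                    mask1_cons_nomatch 'e' '-' '+' _ (by rintro ⟨h1, -⟩; exact absurd h1 (by decide))]]
          rw [show mask1 'E' '+' ('E' :: '+' :: mask1 'e' '-' (mask1 'e' '+' t))
                = ' ' :: ' ' :: mask1 'E' '+' (mask1 'e' '-' (mask1 'e' '+' t)) from by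
                rw [mask1, if_pos ⟨rfl, rfl⟩]]
          rw [mask1_space2 'E' '-' (by decide), ih t hlt]
        · -- E -
          rw [show mask1 'e' '+' ('E' :: '-' :: t) = 'E' :: '-' :: mask1 'e' '+' t from by
                rw [mask1, if_neg (by rintro ⟨h1, -⟩; exact absurd h1 (by decide)),
                    mask1_cons_nomatch 'e' '+' '-' t (by rintro ⟨h1, -⟩; exact absurd h1 (by decide))]]
          rw [show mask1 'e' '-' ('E' :: '-' :: mask1 'e' '+' t)
                = 'E' :: '-' :: mask1 'e' '-' (mask1 'e' '+' t) from by
                rw [mask1, if_neg (by rintro ⟨h1, -⟩; exact absurd h1 (by decide)),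
                    mask1_cons_nomatch 'e' '-' '-' _ (by rintro ⟨h1, -⟩; exact absurd h1 (by decide))]]
          rw [show mask1 'E' '+' ('E' :: '-' :: mask1 'e' '-' (mask1 'e' '+' t))
                = 'E' :: '-' :: mask1 'E' '+' (mask1 'e' '-' (mask1 'e' '+' t)) from by
                rw [mask1, if_neg (by rintro ⟨-, h2⟩; exact absurd h2 (by decide)),
                    mask1_cons_nomatch 'E' '+' '-' _ (by rintro ⟨h1, -⟩; exact absurd h1 (by decide))]]
          rw [show mask1 'E' '-' ('E' :: '-' :: mask1 'E' '+' (mask1 'e' '-' (mask1 'e' '+' t)))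
                = ' ' :: ' ' :: mask1 'E' '-' (mask1 'E' '+' (mask1 'e' '-' (mask1 'e' '+' t))) from by
                rw [mask1, if_pos ⟨rfl, rfl⟩]]
          rw [ih t hlt]
      · -- no pattern matches at the front: every layer keeps a and recurses on the rest
        have hok0 : (b :: t).head? = some b ∨ (b :: t).head? = some ' ' := Or.inl rfl
        have hok1 := mask1_headOk 'e' '+' b _ hok0
        have hok2 := mask1_headOk 'e' '-' b _ hok1
        have hok3 := mask1_headOk 'E' '+' b _ hok2
        have key : ∀ (x y : Char) (M : List Char),
            (x = 'e' ∨ x = 'E') → (y = '+' ∨ y = '-') →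
            (M.head? = some b ∨ M.head? = some ' ') →
            ¬(a = x ∧ M.head? = some y) := by
          rintro x y M hx hy hok ⟨rfl, hh⟩
          rcases hok with hh' | hh'
          · rw [hh'] at hh
            have hb : b = y := by injection hh
            exact hm ⟨hx, hb ▸ hy⟩
          · rw [hh'] at hh
            have : ' ' = y := by injection hh
            rcases hy with rfl | rfl <;> exact absurd this (by decide)
        rw [mask1_cons_nomatch 'e' '+' a _ (key 'e' '+' _ (Or.inl rfl) (Or.inl rfl) hok0),
            mask1_cons_nomatch 'e' '-' a _ (key 'e' '-' _ (Or.inl rfl) (Or.inr rfl) hok1),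
            mask1_cons_nomatch 'E' '+' a _ (key 'E' '+' _ (Or.inr rfl) (Or.inl rfl) hok2),
            mask1_cons_nomatch 'E' '-' a _ (key 'E' '-' _ (Or.inr rfl) (Or.inr rfl) hok3),
            ih (b :: t) hlbt, maskF, if_neg hm]

-- the head contribution of an unmasked character x to OpsMemP
theorem pairPred_iff_head (slash : Bool) (c x : Char)
    (hc : (c = 'e' ∨ c = 'E') → (x == '+' || x == '-') = false) :
    pairPred slash (c, x) = true ↔
      ((slash = true ∧ ('*' = x ∨ '/' = x)) ∨ '+' = x ∨ '-' = x) := by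
  by_cases hce : c = 'e' ∨ c = 'E'
  · have hx := hc hce
    have hx1 : x ≠ '+' := by intro hh; subst hh; simp at hx
    have hx2 : x ≠ '-' := by intro hh; subst hh; simp at hx
    rcases hce with rfl | rfl <;>
    · simp only [pairPred, Bool.or_eq_true, Bool.and_eq_true, beq_iff_eq]
      constructor
      · rintro (⟨hs, hor⟩ | ⟨hor, -⟩)
        · exact Or.inl ⟨hs, hor.imp Eq.symm Eq.symm⟩
        · rcases hor with rfl | rfl
          · exact absurd rfl hx1
          · exact absurd rfl hx2
      · rintro (⟨hs, hor⟩ | hh | hh)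
        · exact Or.inl ⟨hs, hor.imp Eq.symm Eq.symm⟩
        · exact absurd hh.symm hx1
        · exact absurd hh.symm hx2
  · have hc1 : c ≠ 'e' := fun hh => hce (Or.inl hh)
    have hc2 : c ≠ 'E' := fun hh => hce (Or.inr hh)
    have hnot : (!(c == 'e' || c == 'E')) = true := by
      simp [hc1, hc2]
    simp only [pairPred, Bool.or_eq_true, Bool.and_eq_true, beq_iff_eq, hnot, and_true]
    constructor
    · rintro (⟨hs, hor⟩ | hor)
      · exact Or.inl ⟨hs, hor.imp Eq.symm Eq.symm⟩
      · exact Or.inr (hor.imp Eq.symm Eq.symm)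
    · rintro (⟨hs, hor⟩ | hh | hh)
      · exact Or.inl ⟨hs, hor.imp Eq.symm Eq.symm⟩
      · exact Or.inr (Or.inl hh.symm)
      · exact Or.inr (Or.inr hh.symm)

theorem opsMemP_cons (slash : Bool) (x : Char) (m : List Char) :
    OpsMemP slash (x :: m) ↔
      ((slash = true ∧ ('*' = x ∨ '/' = x)) ∨ '+' = x ∨ '-' = x) ∨ OpsMemP slash m := by
  simp only [OpsMemP, List.mem_cons]
  tauto

theorem opsMemP_space2 (slash : Bool) (m : List Char) :
    OpsMemP slash (' ' :: ' ' :: m) ↔ OpsMemP slash m := by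
  rw [opsMemP_cons, opsMemP_cons]
  constructor
  · rintro ((⟨-, h | h⟩ | h | h) | (⟨-, h | h⟩ | h | h) | h) <;>
      first | exact h | exact absurd ‹_› (by decide)
  · exact fun h => Or.inr (Or.inr h)

-- core: A's pair-scan starting after char c equals operator membership in the masked rest
theorem zipAny_iff_opsMem :
    ∀ (n : Nat) (l : List Char) (c : Char) (slash : Bool), l.length ≤ n →
      ((c = 'e' ∨ c = 'E') → headPM l = false) →
      ((((c :: l).zip l).any (pairPred slash)) = true ↔ OpsMemP slash (maskF l)) := by
  intro n
  induction n with
  | zero =>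
    intro l c slash h hc
    have hl : l = [] := by cases l with | nil => rfl | cons a t => simp at h
    subst hl
    simp [maskF, OpsMemP]
  | succ n ih =>
    intro l c slash h hc
    match l with
    | [] => simp [maskF, OpsMemP]
    | [x] =>
      have : ((c :: [x]).zip [x]).any (pairPred slash) = pairPred slash (c, x) := by
        simp [List.zip]
      rw [this, maskF]
      rw [pairPred_iff_head slash c x (fun hce => by simpa [headPM] using hc hce)]
      simp only [OpsMemP, List.mem_singleton]
    | x :: t0 :: t' =>
      have hzip : ((c :: x :: t0 :: t').zip (x :: t0 :: t')) =
          (c, x) :: ((x :: t0 :: t').zip (t0 :: t')) := rfl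
      rw [hzip, List.any_cons]
      by_cases hm : (x = 'e' ∨ x = 'E') ∧ (t0 = '+' ∨ t0 = '-')
      · -- masked front: neither of the first two pairs fires
        rw [maskF, if_pos hm]
        obtain ⟨hx, ht0⟩ := hm
        have hp1 : pairPred slash (c, x) = false := by
          rcases hx with rfl | rfl <;> simp [pairPred]
        have hzip2 : ((x :: t0 :: t').zip (t0 :: t')) =
            (x, t0) :: ((t0 :: t').zip t') := rfl
        have hp2 : pairPred slash (x, t0) = false := by
          rcases hx with rfl | rfl <;> rcases ht0 with rfl | rfl <;> simp [pairPred]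
        rw [hp1, hzip2, List.any_cons, hp2]
        simp only [Bool.false_or]
        rw [ih t' t0 slash (by simp at h; omega)
            (fun hce => by rcases ht0 with rfl | rfl <;> rcases hce with h' | h' <;> exact absurd h' (by decide))]
        rw [opsMemP_space2]
      · rw [maskF, if_neg hm]
        have hrest := ih (t0 :: t') x slash (by simp at h ⊢; omega)
          (fun hxe => by
            simp only [headPM, Bool.or_eq_false_iff, beq_eq_false_iff_ne, ne_eq]
            constructor <;> intro h' <;> exact hm ⟨hxe, by simp [h']⟩)
        have hhead := pairPred_iff_head slash c x
          (fun hce => by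
            have := hc hce
            simpa [headPM] using this)
        rw [opsMemP_cons]
        rw [Bool.or_eq_true, hrest, hhead]

-- membership of a single character as substring search
theorem isIn_singleton_iff (a : Char) (l : List Char) :
    PySem.Chars.isIn [a] l = true ↔ a ∈ l := by
  rw [PySem.Chars.isIn_iff_infix]
  constructor
  · intro h
    exact h.mem (by simp)
  · intro h
    obtain ⟨u, v, rfl⟩ := List.append_of_mem h
    exact ⟨u, v, by simp⟩

-- B's membership loop decides OpsMemP of the tail of the masked text
theorem alt_cond_iff (slash : Bool) (tl : List Char) :
    ((if slash then "+-*/" else "+-").toList.any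
      (fun op => PySem.Chars.isIn [op] tl)) = true ↔ OpsMemP slash tl := by
  cases slash
  · rw [show (if (false : Bool) then "+-*/" else "+-") = "+-" from rfl]
    rw [show ("+-").toList = ['+', '-'] from rfl]
    simp only [List.any_cons, List.any_nil, Bool.or_eq_true, Bool.or_false,
      isIn_singleton_iff, OpsMemP]
    simp
  · rw [show (if (true : Bool) then "+-*/" else "+-") = "+-*/" from rfl]
    rw [show ("+-*/").toList = ['+', '-', '*', '/'] from rfl]
    simp only [List.any_cons, List.any_nil, Bool.or_eq_true, Bool.or_false,
      isIn_singleton_iff, OpsMemP]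
    tauto

-- top level: A's loop from index 1 equals operator membership in the masked text past 0
theorem loopA_iff_opsMem (s : List Char) (slash : Bool) :
    addParensLoopA s slash 1 = true ↔ OpsMemP slash ((maskF s).tail) := by
  rw [addParensLoopA_eq_any s slash s.length 1 (by omega) le_rfl]
  simp only [Nat.sub_self, List.drop_zero]
  match s with
  | [] => simp [maskF, OpsMemP]
  | [a] => simp [maskF, OpsMemP, List.zip]
  | a :: l0 :: l' =>
    show (((a :: l0 :: l').zip (l0 :: l')).any (pairPred slash)) = true ↔ _
    by_cases hm : (a = 'e' ∨ a = 'E') ∧ (l0 = '+' ∨ l0 = '-')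
    · rw [maskF, if_pos hm]
      obtain ⟨ha, hl0⟩ := hm
      have hzip : ((a :: l0 :: l').zip (l0 :: l')) = (a, l0) :: ((l0 :: l').zip l') := rfl
      have hp1 : pairPred slash (a, l0) = false := by
        rcases ha with rfl | rfl <;> rcases hl0 with rfl | rfl <;> simp [pairPred]
      rw [hzip, List.any_cons, hp1]
      simp only [Bool.false_or, List.tail_cons]
      rw [zipAny_iff_opsMem l'.length l' l0 slash le_rfl
          (fun hce => by rcases hl0 with rfl | rfl <;> rcases hce with h' | h' <;> exact absurd h' (by decide))]
      rw [opsMemP_cons]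
      constructor
      · exact fun h => Or.inr h
      · rintro ((⟨-, h | h⟩ | h | h) | h) <;> first | exact h | exact absurd ‹_› (by decide)
    · rw [maskF, if_neg hm, List.tail_cons]
      exact zipAny_iff_opsMem (l0 :: l').length (l0 :: l') a slash le_rfl
        (fun hae => by
          simp only [headPM, Bool.or_eq_false_iff, beq_eq_false_iff_ne, ne_eq]
          constructor <;> intro h' <;> exact hm ⟨hae, by simp [h']⟩)

-- ===== VERDICT (by name: the statement is the Claim_ definition above) =====
set_option maxHeartbeats 1000000 in
theorem add_parens_spec : Claim_equal_add_parens := by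
  intro str operand _ _
  unfold Spec_add_parens add_parens add_parens_alt
  by_cases h : operand == "-"
  · rw [if_pos h, if_pos h]
  · rw [if_neg h, if_neg h]
    dsimp only
    have hmasked : (PySem.Str.replace (PySem.Str.replace (PySem.Str.replace
        (PySem.Str.replace str "e+" "  ") "e-" "  ") "E+" "  ") "E-" "  ").toList
        = maskF str.toList := by
      rw [PySem.Str.toList_replace, PySem.Str.toList_replace, PySem.Str.toList_replace,
          PySem.Str.toList_replace]
      show PySem.Chars.replace (PySem.Chars.replace (PySem.Chars.replace
        (PySem.Chars.replace str.toList ['e','+'] [' ',' ']) ['e','-'] [' ',' '])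
        ['E','+'] [' ',' ']) ['E','-'] [' ',' '] = _
      rw [replace_eq_mask1, replace_eq_mask1, replace_eq_mask1, replace_eq_mask1]
      exact chain_eq_maskF str.toList.length str.toList le_rfl
    have htail : (PySem.Str.slice (PySem.Str.replace (PySem.Str.replace (PySem.Str.replace
        (PySem.Str.replace str "e+" "  ") "e-" "  ") "E+" "  ") "E-" "  ") (some 1) none).toList
        = (maskF str.toList).tail := by
      rw [PySem.Str.toList_slice, hmasked]
      simp only [PySem.Chars.slice, PySem.List.slice_from_one]
    have hsame : ∀ op : Char, PySem.Str.isIn (String.ofList [op])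
        (PySem.Str.slice (PySem.Str.replace (PySem.Str.replace (PySem.Str.replace
          (PySem.Str.replace str "e+" "  ") "e-" "  ") "E+" "  ") "E-" "  ") (some 1) none)
        = PySem.Chars.isIn [op] ((maskF str.toList).tail) := by
      intro op
      rw [PySem.Str.isIn_eq, String.toList_ofList, htail]
    have hcond : addParensLoopA str.toList (operand == "/") 1
        = ((if operand == "/" then "+-*/" else "+-").toList.any
            (fun op => PySem.Str.isIn (String.ofList [op])
              (PySem.Str.slice (PySem.Str.replace (PySem.Str.replace (PySem.Str.replace
                (PySem.Str.replace str "e+" "  ") "e-" "  ") "E+" "  ") "E-" "  ") (some 1) none))) := by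
      have hiff := (loopA_iff_opsMem str.toList (operand == "/")).trans
        (alt_cond_iff (operand == "/") ((maskF str.toList).tail)).symm
      simp only [hsame]
      cases hA : addParensLoopA str.toList (operand == "/") 1
      · cases hB : ((if operand == "/" then "+-*/" else "+-").toList.any
            (fun op => PySem.Chars.isIn [op] ((maskF str.toList).tail)))
        · rfl
        · exact absurd (hiff.mpr hB) (by simp [hA])
      · exact (hiff.mp hA).symm
    rw [hcond]
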